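-- pv_equiv track=rewrite | github.com/NeoHelios147/NeoHelios | Warhammer website/app.py | subsave
-- ===== SOURCE A (Python) =====
-- def subsave(L,uw,save):
--     Vi=[]
--     for i in range(len(L)):
--         if L[i]<save:
--             uw+=1
--             Vi.append(i)
--     for i in range(len(Vi)):
--         L.pop(Vi[-1-i])
--     return L,uw
-- ===== SOURCE B (Python) =====
-- def subsave(L, uw, save):
--     k = 0
--     for x in L:
--         if x < save:
--             uw += 1
--         else:
--             L[k] = x
--             k += 1
--     del L[k:]
--     return L, uw
-- ===== Notes on version B (the rewrite author's own statement) =====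
-- stated objective: faster
-- what changed: Single-pass in-place two-pointer compaction (write cursor + one tail truncation) instead of collecting offending indices and removing them with repeated reverse pops.
import Mathlib
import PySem

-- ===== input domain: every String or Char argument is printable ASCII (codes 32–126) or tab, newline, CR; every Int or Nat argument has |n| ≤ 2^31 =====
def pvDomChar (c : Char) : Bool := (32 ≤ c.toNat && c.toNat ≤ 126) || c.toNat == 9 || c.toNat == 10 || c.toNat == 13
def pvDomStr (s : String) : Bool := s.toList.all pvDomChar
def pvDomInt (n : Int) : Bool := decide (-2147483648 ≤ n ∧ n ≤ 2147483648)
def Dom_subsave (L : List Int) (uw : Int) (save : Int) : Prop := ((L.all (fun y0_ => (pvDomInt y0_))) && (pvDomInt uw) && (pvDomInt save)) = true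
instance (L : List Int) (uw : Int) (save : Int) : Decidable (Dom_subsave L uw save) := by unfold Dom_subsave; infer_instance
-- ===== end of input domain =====

-- B replaces A's index-collection + reverse-pop removal by a single-pass write-cursor
-- compaction (faster); both Pythons mutate L in place the same way, the theorems are
-- about the returned value.

-- ===== PORT A =====
def subsave (L : List Int) (uw : Int) (save : Int) : List Int × Int :=
  -- first loop: collect offending indices into Vi, counting into uw
  let s := (PySem.List.pyRange 0 (PySem.List.len L) 1).foldl
    (fun (st : Int × List Int) i =>
      if PySem.List.pyGetD L i 0 < save then (st.1 + 1, st.2 ++ [i]) else st)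
    (uw, [])
  -- second loop: L.pop(Vi[-1-i]) for i in range(len(Vi))
  let L' := (PySem.List.pyRange 0 (PySem.List.len s.2) 1).foldl
    (fun M i =>
      match PySem.List.pop? M (PySem.List.pyGetD s.2 (-1 - i) 0) with
      | some r => r.2
      | none => M)
    L
  (L', s.1)

-- ===== PORT B =====
def subsave_alt (L : List Int) (uw : Int) (save : Int) : List Int × Int :=
  -- write-cursor compaction: st.1 is L[0:k] (the kept prefix), st.2 is uw
  let s := L.foldl
    (fun (st : List Int × Int) x =>
      if x < save then (st.1, st.2 + 1) else (st.1 ++ [x], st.2))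
    ([], uw)
  (s.1, s.2)

-- ===== PRECONDITION & SPEC =====
def Spec_subsave (L : List Int) (uw : Int) (save : Int) (out : List Int × Int) : Prop := out = subsave_alt L uw save
instance (L : List Int) (uw : Int) (save : Int) (out : List Int × Int) : Decidable (Spec_subsave L uw save out) := by unfold Spec_subsave; infer_instance

-- ===== CLAIM (what is proved, stated in full; the proofs are below) =====
def Claim_equal_subsave : Prop := ∀ (L : List Int) (uw : Int) (save : Int), Dom_subsave L uw save → Spec_subsave L uw save (subsave L uw save)

-- ===== LEMMAS AND PROOFS =====

-- total indexing helper used by the proofs (kept folded so simp does not normalise it away)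
def nthD (L : List Int) (k : Nat) : Int := L.getD k 0

theorem nthD_cons_zero (x : Int) (xs : List Int) : nthD (x :: xs) 0 = x := rfl
theorem nthD_cons_succ (x : Int) (xs : List Int) (k : Nat) :
    nthD (x :: xs) (k + 1) = nthD xs k := by
  simp [nthD]

-- the offending-index list of L
def offIdx (save : Int) (L : List Int) : List Nat :=
  (List.range L.length).filter (fun k => decide (nthD L k < save))

-- B's fold computes (kept prefix ++ keep-filter, count + removed)
theorem b_fold (save : Int) (L : List Int) (K : List Int) (u : Int) :
    L.foldl (fun (st : List Int × Int) x =>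
      if x < save then (st.1, st.2 + 1) else (st.1 ++ [x], st.2)) (K, u)
    = (K ++ L.filter (fun x => !decide (x < save)),
       u + (L.countP (fun x => decide (x < save)) : Int)) := by
  induction L generalizing K u with
  | nil => simp
  | cons x xs ih =>
    by_cases h : x < save
    · simp only [List.foldl_cons, ih, List.filter_cons, List.countP_cons, h,
        decide_true, Bool.not_true, Prod.mk.injEq]
      exact ⟨rfl, by push_cast; ring⟩
    · simp only [List.foldl_cons, ih, List.filter_cons, List.countP_cons, h,
        decide_false, Bool.not_false, Prod.mk.injEq]
      exact ⟨by simp, by push_cast; ring⟩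

-- the pop-or-keep step at a Nat index is unconditionally eraseIdx
theorem popStep_eq_eraseIdx (M : List Int) (k : Nat) :
    (match PySem.List.pop? M (k : Int) with
     | some r => r.2
     | none => M) = M.eraseIdx k := by
  by_cases h : k < M.length
  · rw [PySem.List.pop?_natCast M k h]
  · have h1 : PySem.List.pop? M (k : Int) = none := by
      simp only [PySem.List.pop?, PySem.List.pyIdx?]
      split_ifs with h2 h3 <;> simp_all <;> omega
    rw [h1, List.eraseIdx_of_length_le (by omega)]

-- reading V[-1-i] over range(len(V)) enumerates V reversed
theorem map_neg_index_eq_reverse (V : List Int) :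
    (PySem.List.pyRange 0 (PySem.List.len V) 1).map
      (fun i => PySem.List.pyGetD V (-1 - i) 0) = V.reverse := by
  apply List.ext_getElem
  · simp [PySem.List.length_pyRange_one]
  · intro k h1 h2
    have hk : k < V.length := by simpa using h2
    have hr : k < (PySem.List.pyRange 0 (PySem.List.len V) 1).length := by
      simp [PySem.List.length_pyRange_one]; omega
    rw [List.getElem_map, PySem.List.getElem_pyRange_one _ _ _ hr, List.getElem_reverse]
    have : (0 + (k : Int)) = (k : Int) := by ring
    rw [this]
    have h3 : (-1 - (k : Int)) = -((k + 1 : Nat) : Int) := by push_cast; ring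
    rw [h3, PySem.List.pyGetD_neg_natCast V (k + 1) 0 (by omega) (by omega)]
    congr 1
    omega

-- erasing shifted indices under a cons
theorem erase_shift (ks : List Nat) (x : Int) (M : List Int) :
    ks.foldl (fun M k => M.eraseIdx (k + 1)) (x :: M)
    = x :: ks.foldl (fun M k => M.eraseIdx k) M := by
  induction ks generalizing M with
  | nil => rfl
  | cons k ks ih => simp only [List.foldl_cons, List.eraseIdx_cons_succ, ih]

theorem offIdx_cons (save x : Int) (xs : List Int) :
    offIdx save (x :: xs)
    = (if x < save then [0] else []) ++ (offIdx save xs).map Nat.succ := by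
  unfold offIdx
  rw [List.length_cons, List.range_succ_eq_map, List.filter_cons, List.filter_map]
  have hc : (fun k => decide (nthD (x :: xs) k < save)) ∘ Nat.succ
      = fun k => decide (nthD xs k < save) := by
    funext k
    simp [Function.comp, nthD_cons_succ]
  rw [hc]
  by_cases h : x < save <;> simp [h, nthD_cons_zero]

-- popping the offending indices back-to-front leaves exactly the keep-filter
theorem erase_offIdx (save : Int) (L : List Int) :
    (offIdx save L).reverse.foldl (fun M k => M.eraseIdx k) L
    = L.filter (fun x => !decide (x < save)) := by
  induction L with
  | nil => rfl
  | cons x xs ih =>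
    rw [offIdx_cons]
    have hshift : ((offIdx save xs).map Nat.succ).reverse.foldl
        (fun M k => M.eraseIdx k) (x :: xs)
        = x :: (offIdx save xs).reverse.foldl (fun M k => M.eraseIdx k) xs := by
      rw [← List.map_reverse, List.foldl_map]
      have : (fun (M : List Int) (k : Nat) => M.eraseIdx (Nat.succ k))
          = fun (M : List Int) (k : Nat) => M.eraseIdx (k + 1) := rfl
      rw [this, erase_shift]
    by_cases h : x < save
    · rw [if_pos h, List.reverse_append, List.foldl_append, hshift]
      simp only [List.reverse_cons, List.reverse_nil, List.nil_append, List.foldl_cons,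
        List.foldl_nil, List.eraseIdx_cons_zero, ih]
      simp [h]
    · rw [if_neg h, List.nil_append, hshift, ih]
      simp [h]

-- A's first loop: count and index list in closed form
theorem a_first_loop (save uw : Int) (L : List Int) (n : Nat) :
    (List.range n).foldl
      (fun (st : Int × List Int) k =>
        if nthD L k < save then (st.1 + 1, st.2 ++ [(k : Int)]) else st)
      (uw, [])
    = (uw + (((List.range n).countP (fun k => decide (nthD L k < save))) : Int),
       ((List.range n).filter (fun k => decide (nthD L k < save))).map (fun k : Nat => (k : Int))) := by
  induction n with
  | zero => simp
  | succ n ih =>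
    rw [List.range_succ, List.foldl_append, ih]
    simp only [List.foldl_cons, List.foldl_nil, List.countP_append, List.filter_append]
    by_cases h : nthD L n < save
    · simp only [List.countP_cons, List.countP_nil, List.filter_cons,
        List.filter_nil, h, decide_true, List.map_append]
      simp only [if_true, List.map_cons, List.map_nil, Prod.mk.injEq]
      exact ⟨by push_cast; ring, by simp⟩
    · simp [h]

theorem offIdx_length (save : Int) (L : List Int) :
    (offIdx save L).length = L.countP (fun x => decide (x < save)) := by
  induction L with
  | nil => rfl
  | cons x xs ih =>
    rw [offIdx_cons]
    by_cases h : x < save <;> simp [h, ih]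

-- ===== VERDICT (by name: the statement is the Claim_ definition above) =====
theorem subsave_spec : Claim_equal_subsave := by
  intro L uw save _
  show subsave L uw save = subsave_alt L uw save
  have hB : subsave_alt L uw save
      = (L.filter (fun x => !decide (x < save)),
         uw + (L.countP (fun x => decide (x < save)) : Int)) := by
    unfold subsave_alt
    rw [b_fold save L [] uw]
    simp
  -- A's first loop in closed form
  have hfun : (fun (st : Int × List Int) (k : Nat) =>
        if PySem.List.pyGetD L ((0 : Int) + (k : Int)) 0 < save
        then (st.1 + 1, st.2 ++ [(0 : Int) + (k : Int)]) else st)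
      = fun st k => if nthD L k < save then (st.1 + 1, st.2 ++ [(k : Int)]) else st := by
    funext st k
    simp [nthD, PySem.List.pyGetD_natCast]
  have h1 : (PySem.List.pyRange 0 (PySem.List.len L) 1).foldl
      (fun (st : Int × List Int) i =>
        if PySem.List.pyGetD L i 0 < save then (st.1 + 1, st.2 ++ [i]) else st)
      (uw, [])
      = (uw + ((offIdx save L).length : Int), (offIdx save L).map (fun k : Nat => (k : Int))) := by
    rw [PySem.List.pyRange_one, List.foldl_map, PySem.List.len_eq]
    have hn : ((L.length : Int) - 0).toNat = L.length := by omega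
    rw [hn, hfun, a_first_loop save uw L L.length]
    unfold offIdx
    rw [← List.countP_eq_length_filter]
  have h2 : ∀ (V : List Int),
      (PySem.List.pyRange 0 (PySem.List.len V) 1).foldl
        (fun M i =>
          match PySem.List.pop? M (PySem.List.pyGetD V (-1 - i) 0) with
          | some r => r.2
          | none => M) L
      = V.reverse.foldl (fun M v =>
          match PySem.List.pop? M v with
          | some r => r.2
          | none => M) L := by
    intro V
    rw [← map_neg_index_eq_reverse V, List.foldl_map]
  unfold subsave
  simp only [h1, h2]
  rw [← List.map_reverse, List.foldl_map]
  have hstep : (fun (M : List Int) (k : Nat) =>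
      match PySem.List.pop? M ((k : Nat) : Int) with
      | some r => r.2
      | none => M) = fun M k => M.eraseIdx k := by
    funext M k
    exact popStep_eq_eraseIdx M k
  rw [hstep, erase_offIdx, hB, offIdx_length]
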